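-- pv_equiv track=rewrite | github.com/claumartin/PythonExercises | ejerciciosIniciacion/ejerciciosIniciacionC.py | numerosParEnRango
-- ===== SOURCE A (Python) =====
-- def numerosParEnRango(limite):
--     pares = []
--     index = 0
--     while len(pares) < limite:
--         if index % 2 == 0:
--             pares.append(index)
--         index += 1
--     return pares
-- ===== SOURCE B (Python) =====
-- def numerosParEnRango(limite):
--     return list(range(0, 2 * limite, 2))
-- ===== Notes on version B (the rewrite author's own statement) =====
-- stated objective: faster
-- what changed: B builds the even numbers directly with a stepped range(0, 2*limite, 2) instead of scanning every integer, testing index % 2 and appending until the list reaches limite elements.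
import Mathlib
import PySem

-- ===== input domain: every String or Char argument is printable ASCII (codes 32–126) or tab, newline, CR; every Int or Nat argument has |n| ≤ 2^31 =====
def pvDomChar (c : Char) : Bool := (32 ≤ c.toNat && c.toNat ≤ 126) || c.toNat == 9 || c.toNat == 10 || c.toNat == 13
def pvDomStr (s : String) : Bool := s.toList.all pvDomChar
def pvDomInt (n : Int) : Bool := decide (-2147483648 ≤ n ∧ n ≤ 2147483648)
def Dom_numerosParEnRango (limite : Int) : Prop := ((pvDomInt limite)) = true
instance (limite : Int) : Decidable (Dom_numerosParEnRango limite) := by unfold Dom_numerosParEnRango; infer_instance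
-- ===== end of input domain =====

-- B replaces A's scan-every-integer-and-filter-evens loop by a direct stepped range(0, 2*limite, 2).

-- ===== PORT A =====
-- the while loop, with a fuel bound on the iteration count (2*limite iterations suffice; proved in the lemmas)
def numerosParEnRangoLoop (limite : Int) : Nat → List Int → Int → List Int
  | 0, pares, _ => pares
  | fuel + 1, pares, index =>
    if (pares.length : Int) < limite then
      if index % 2 = 0 then
        numerosParEnRangoLoop limite fuel (pares ++ [index]) (index + 1)
      else
        numerosParEnRangoLoop limite fuel pares (index + 1)
    else pares

def numerosParEnRango (limite : Int) : List Int :=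
  numerosParEnRangoLoop limite (2 * limite).toNat [] 0

-- ===== PORT B =====
def numerosParEnRango_alt (limite : Int) : List Int :=
  PySem.List.pyRange 0 (2 * limite) 2

-- ===== PRECONDITION & SPEC =====
def Spec_numerosParEnRango (limite : Int) (out : List Int) : Prop := out = numerosParEnRango_alt limite
instance (limite : Int) (out : List Int) : Decidable (Spec_numerosParEnRango limite out) := by unfold Spec_numerosParEnRango; infer_instance

-- ===== CLAIM (what is proved, stated in full; the proofs are below) =====
def Claim_equal_numerosParEnRango : Prop := ∀ (limite : Int), Dom_numerosParEnRango limite → Spec_numerosParEnRango limite (numerosParEnRango limite)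

-- ===== LEMMAS AND PROOFS =====

-- loop invariant: starting at an even index with n slots left to fill and fuel for 2*n steps,
-- the loop appends i, i+2, ..., i+2(n-1)
theorem numerosParEnRangoLoop_eq (n : Nat) :
    ∀ (fuel : Nat) (limite : Int) (pares : List Int) (i : Int),
      (pares.length : Int) + n = limite → i % 2 = 0 → 2 * n ≤ fuel →
      numerosParEnRangoLoop limite fuel pares i =
        pares ++ (List.range n).map (fun k : Nat => i + 2 * (k : Int)) := by
  induction n with
  | zero =>
    intro fuel limite pares i hn _ _
    cases fuel with
    | zero => simp [numerosParEnRangoLoop]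
    | succ f =>
      rw [numerosParEnRangoLoop, if_neg (by omega)]
      simp
  | succ m ih =>
    intro fuel limite pares i hn hev hfuel
    obtain ⟨f, rfl⟩ : ∃ f, fuel = f + 1 := ⟨fuel - 1, by omega⟩
    rw [numerosParEnRangoLoop, if_pos (by omega), if_pos hev]
    have hlen : ((pares ++ [i]).length : Int) = pares.length + 1 := by simp
    by_cases hm : m = 0
    · subst hm
      obtain ⟨g, rfl⟩ : ∃ g, f = g + 1 := ⟨f - 1, by omega⟩
      rw [numerosParEnRangoLoop, if_neg (by omega)]
      simp
    · obtain ⟨g, rfl⟩ : ∃ g, f = g + 1 := ⟨f - 1, by omega⟩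
      rw [numerosParEnRangoLoop, if_pos (by omega), if_neg (by omega)]
      rw [ih g limite (pares ++ [i]) (i + 1 + 1) (by omega) (by omega) (by omega)]
      rw [List.range_succ_eq_map, List.map_cons, List.map_map, List.append_assoc,
        List.singleton_append]
      congr 1
      congr 1
      · omega
      · apply List.map_congr_left
        intro k _
        simp only [Function.comp_apply]
        push_cast
        ring

-- ===== VERDICT (by name: the statement is the Claim_ definition above) =====
theorem numerosParEnRango_spec : Claim_equal_numerosParEnRango := by
  intro limite _
  unfold Spec_numerosParEnRango numerosParEnRango numerosParEnRango_alt
  by_cases hpos : 0 < limite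
  · rw [numerosParEnRangoLoop_eq limite.toNat ((2 * limite).toNat) limite [] 0 (by simp; omega)
      (by decide) (by omega)]
    rw [PySem.List.pyRange_of_pos 0 (2 * limite) (by norm_num)]
    have : (if (0:Int) < 2 * limite then ((2 * limite - 0 + 2 - 1) / 2).toNat else 0) = limite.toNat := by
      rw [if_pos (by omega)]
      omega
    rw [this]
    simp
  · have h0 : (2 * limite).toNat = 0 := by omega
    rw [h0, numerosParEnRangoLoop]
    rw [PySem.List.pyRange_of_pos 0 (2 * limite) (by norm_num)]
    rw [if_neg (by omega)]
    simp
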